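-- pv_equiv track=rewrite | github.com/charismatic-claire/tomato-fetch-engine | org/cumcubble/tomatos/TomatoImagination.py | match_tomato_images
-- ===== SOURCE A (Python) =====
-- def match_tomato_images( tomato, image_urls ):
--     """
--     Try to find an image url for this particular tomato
--     """
--     ## init
--     tomato_name = tomato['name']
--     tomato_match = { tomato_name: '' }
--     ## make tomato name matchable
--     tomato_name_matchable = tomato_name.lower() \
--         .replace( 'ä', 'ae' ) \
--         .replace( 'ö', 'oe' ) \
--         .replace( 'ü', 'ue' ) \
--         .replace( '´', '' ) \
--         .replace( 'ß', 'ss' ) \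
--         .replace( '-', ' ' ) \
--         .replace( 'aus sibirien', '' ) \
--         .replace( 'kelloggs breakfast', 'kelloggs breakfest' ) \
--         .replace( 'kubanische', 'kubanisch' )
--
--     ## loop image urls
--     for image_url_list in image_urls:
--         ## init
--         is_matching = True
--         image_url = image_url_list[0]
--         ## split name into single words
--         tomato_name_words = tomato_name_matchable.split(" ")
--         ## loop single words
--         for tomato_name_word in tomato_name_words:
--             is_matching = is_matching and ( tomato_name_word in image_url.lower() )
--         if is_matching:
--             tomato_match[ tomato_name ] = image_url
--     ## return result
--     return tomato_match
-- ===== SOURCE B (Python) =====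
-- def match_tomato_images(tomato, image_urls):
--     """
--     Find an image url for this tomato: last url (in input order) whose
--     lowercase text contains every word of the normalised tomato name.
--     """
--     tomato_name = tomato['name']
--     words = tomato_name.lower() \
--         .replace('ä', 'ae') \
--         .replace('ö', 'oe') \
--         .replace('ü', 'ue') \
--         .replace('´', '') \
--         .replace('ß', 'ss') \
--         .replace('-', ' ') \
--         .replace('aus sibirien', '') \
--         .replace('kelloggs breakfast', 'kelloggs breakfest') \
--         .replace('kubanische', 'kubanisch') \
--         .split(" ")
--     for image_url_list in reversed(image_urls):
--         image_url = image_url_list[0]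
--         if all(word in image_url.lower() for word in words):
--             return {tomato_name: image_url}
--     return {tomato_name: ''}
-- ===== Notes on version B (the rewrite author's own statement) =====
-- stated objective: simpler
-- what changed: B precomputes the word list once, scans the urls in reverse and returns on the first (i.e. last overall) match instead of scanning every url and overwriting a dict entry; the inner word loop with a boolean accumulator becomes all(...) with short-circuit.
import Mathlib
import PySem

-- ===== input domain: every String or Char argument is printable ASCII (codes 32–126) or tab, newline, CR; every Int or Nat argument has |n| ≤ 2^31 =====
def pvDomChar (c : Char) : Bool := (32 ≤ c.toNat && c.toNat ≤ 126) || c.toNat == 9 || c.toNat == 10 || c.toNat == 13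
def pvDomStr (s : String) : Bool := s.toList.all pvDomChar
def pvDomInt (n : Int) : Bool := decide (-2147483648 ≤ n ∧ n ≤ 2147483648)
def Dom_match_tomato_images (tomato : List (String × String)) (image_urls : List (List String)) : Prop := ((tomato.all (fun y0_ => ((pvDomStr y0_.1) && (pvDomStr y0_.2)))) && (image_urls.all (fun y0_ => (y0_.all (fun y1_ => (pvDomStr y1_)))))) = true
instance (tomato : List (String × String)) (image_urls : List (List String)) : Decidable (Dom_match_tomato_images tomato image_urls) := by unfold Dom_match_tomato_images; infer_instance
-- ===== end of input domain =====

-- B scans the urls in reverse with an early exit instead of scanning all and overwriting;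
-- neither version mutates its arguments, so the claim is about the return value.

-- shared name normalisation: the literal replace chain both Pythons apply to tomato_name.lower()
def pvNormalize (tomato_name : String) : String :=
  (((((((((PySem.Str.lower tomato_name).replace "ä" "ae").replace "ö" "oe").replace "ü" "ue").replace
      "´" "").replace "ß" "ss").replace "-" " ").replace "aus sibirien" "").replace
      "kelloggs breakfast" "kelloggs breakfest").replace "kubanische" "kubanisch"

-- ===== PORT A =====
def match_tomato_images (tomato : List (String × String)) (image_urls : List (List String)) : List (String × String) :=
  match (PySem.Dict.mk tomato).get? "name" with
  | none => []  -- KeyError: excluded by Pre_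
  | some tomato_name =>
    let tomato_match := (PySem.Dict.empty : PySem.Dict String String).insert tomato_name ""
    let tomato_name_matchable := pvNormalize tomato_name
    let final := image_urls.foldl (fun d image_url_list =>
      match PySem.List.pyGet? image_url_list 0 with
      | none => d  -- IndexError: excluded by Pre_
      | some image_url =>
        -- split(" ") with a nonempty separator: split? is always `some`; getD [] is a totality guard
        let tomato_name_words := (PySem.Str.split? tomato_name_matchable " ").getD []
        let is_matching := tomato_name_words.foldl
          (fun b w => b && PySem.Str.isIn w (PySem.Str.lower image_url)) true
        if is_matching then d.insert tomato_name image_url else d) tomato_match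
    final.items

-- ===== PORT B =====
-- reversed scan with early exit: first inner-list head (back to front) whose lowercase form contains all words
def pvRevScan (words : List String) (rev_urls : List (List String)) : Option String :=
  match rev_urls with
  | [] => none
  | image_url_list :: rest =>
    match PySem.List.pyGet? image_url_list 0 with
    | none => none  -- IndexError: excluded by Pre_
    | some image_url =>
      if words.all (fun w => PySem.Str.isIn w (PySem.Str.lower image_url)) then some image_url
      else pvRevScan words rest

def match_tomato_images_alt (tomato : List (String × String)) (image_urls : List (List String)) : List (String × String) :=
  match (PySem.Dict.mk tomato).get? "name" with
  | none => []  -- KeyError: excluded by Pre_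
  | some tomato_name =>
    let words := (PySem.Str.split? (pvNormalize tomato_name) " ").getD []
    match pvRevScan words image_urls.reverse with
    | some image_url => [(tomato_name, image_url)]
    | none => [(tomato_name, "")]

-- ===== PRECONDITION & SPEC =====
-- Pre_ excludes exactly the inputs where Python A raises: a missing 'name' key (KeyError)
-- and an empty inner url list (IndexError on image_url_list[0]).
def Pre_match_tomato_images (tomato : List (String × String)) (image_urls : List (List String)) : Prop :=
  "name" ∈ tomato.map Prod.fst ∧ ∀ lst ∈ image_urls, lst ≠ []
instance (tomato : List (String × String)) (image_urls : List (List String)) : Decidable (Pre_match_tomato_images tomato image_urls) := by unfold Pre_match_tomato_images; infer_instance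

def pvWitness_match_tomato_images : (List (String × String)) × List (List String) :=
  ([("name", "Roma Tom")], [["roma tom.jpg"], ["x.jpg"]])

def Spec_match_tomato_images (tomato : List (String × String)) (image_urls : List (List String)) (out : List (String × String)) : Prop := out = match_tomato_images_alt tomato image_urls
instance (tomato : List (String × String)) (image_urls : List (List String)) (out : List (String × String)) : Decidable (Spec_match_tomato_images tomato image_urls out) := by unfold Spec_match_tomato_images; infer_instance

-- ===== CLAIM (what is proved, stated in full; the proofs are below) =====
def Claim_equal_match_tomato_images : Prop := ∀ (tomato : List (String × String)) (image_urls : List (List String)), Dom_match_tomato_images tomato image_urls → Pre_match_tomato_images tomato image_urls → Spec_match_tomato_images tomato image_urls (match_tomato_images tomato image_urls)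

-- ===== LEMMAS AND PROOFS =====

lemma foldl_and_eq_all (p : String → Bool) (l : List String) (b : Bool) :
    l.foldl (fun acc w => acc && p w) b = (b && l.all p) := by
  induction l generalizing b with
  | nil => simp
  | cons x xs ih => simp [List.foldl, List.all_cons, ih, Bool.and_assoc]

lemma pvRevScan_append (words : List String) (xs ys : List (List String))
    (hxs : ∀ lst ∈ xs, lst ≠ []) :
    pvRevScan words (xs ++ ys) =
      (match pvRevScan words xs with
       | some u => some u
       | none => pvRevScan words ys) := by
  induction xs with
  | nil => simp [pvRevScan]
  | cons lst rest ih =>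
    obtain ⟨h, t, rfl⟩ := List.exists_cons_of_ne_nil (hxs lst (by simp))
    simp only [List.cons_append, pvRevScan, PySem.List.pyGet?_zero_cons]
    split
    · rfl
    · exact ih (fun l hl => hxs l (by simp [hl]))

lemma insert_insert_same (name v h : String) :
    ((PySem.Dict.empty : PySem.Dict String String).insert name v).insert name h
      = (PySem.Dict.empty : PySem.Dict String String).insert name h := by
  apply PySem.Dict.ext
  simp [PySem.Dict.items_insert, PySem.Dict.contains_insert_self, PySem.Dict.empty]

-- A's fold over the urls, starting from the one-key dict {name: v}, ends at
-- {name: last match or v}; B's reversed scan with early exit finds the same value.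
lemma loop_eq (name : String) (words : List String) (l : List (List String)) (v : String)
    (hl : ∀ lst ∈ l, lst ≠ []) :
    l.foldl (fun d image_url_list =>
      match PySem.List.pyGet? image_url_list 0 with
      | none => d
      | some image_url =>
        if words.all (fun w => PySem.Str.isIn w (PySem.Str.lower image_url))
        then d.insert name image_url else d)
      ((PySem.Dict.empty : PySem.Dict String String).insert name v)
    = (PySem.Dict.empty : PySem.Dict String String).insert name
        ((pvRevScan words l.reverse).getD v) := by
  induction l generalizing v with
  | nil => simp [pvRevScan]
  | cons lst rest ih =>
    obtain ⟨h, t, rfl⟩ := List.exists_cons_of_ne_nil (hl lst (by simp))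
    have hrest : ∀ l ∈ rest, l ≠ [] := fun l hl' => hl l (by simp [hl'])
    have hrev : ∀ l ∈ rest.reverse, l ≠ [] := by simpa using hrest
    rw [List.foldl_cons, List.reverse_cons, pvRevScan_append words rest.reverse [h :: t] hrev]
    simp only [PySem.List.pyGet?_zero_cons]
    by_cases hm : words.all (fun w => PySem.Str.isIn w (PySem.Str.lower h)) = true
    · rw [if_pos hm, insert_insert_same, ih h hrest]
      cases pvRevScan words rest.reverse with
      | some u => rfl
      | none =>
        simp only [pvRevScan, PySem.List.pyGet?_zero_cons]
        rw [if_pos hm]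
        rfl
    · rw [if_neg hm, ih v hrest]
      cases pvRevScan words rest.reverse with
      | some u => rfl
      | none =>
        simp only [pvRevScan, PySem.List.pyGet?_zero_cons]
        rw [if_neg hm]

-- ===== VERDICT (by name: the statement is the Claim_ definition above) =====
theorem match_tomato_images_spec : Claim_equal_match_tomato_images := by
  intro tomato image_urls _ hpre
  obtain ⟨hname, hurls⟩ := hpre
  unfold Spec_match_tomato_images match_tomato_images match_tomato_images_alt
  have hk : "name" ∈ (PySem.Dict.mk tomato).keys := by
    simpa [PySem.Dict.keys_mk] using hname
  obtain ⟨v, hv⟩ : ∃ v, (PySem.Dict.mk tomato).get? "name" = some v := by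
    cases hg : (PySem.Dict.mk tomato).get? "name" with
    | none => exact absurd hk ((PySem.Dict.get?_eq_none_iff_not_mem_keys _ _).mp hg)
    | some v => exact ⟨v, rfl⟩
  rw [hv]
  simp only [foldl_and_eq_all, Bool.true_and]
  rw [loop_eq v ((PySem.Str.split? (pvNormalize v) " ").getD []) image_urls "" hurls]
  cases pvRevScan ((PySem.Str.split? (pvNormalize v) " ").getD []) image_urls.reverse with
  | none => rfl
  | some u => rfl
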